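-- pv_equiv track=rewrite | github.com/rubelw/OSSS | src/OSSS/ai/agents/query_data/handlers/gpa_calculations_handler.py | _select_gpa_calculations_fields
-- ===== SOURCE A (Python) =====
-- from typing import Any, Dict, List, Sequence
--
-- def _select_gpa_calculations_fields(
--     rows: Sequence[Dict[str, Any]],
-- ) -> List[str]:
--     """
--     Choose a stable, user-friendly column ordering.
--     Automatically include any extra keys returned by the API.
--     """
--     if not rows:
--         return []
--
--     # Update as needed to match your real schema
--     preferred_order = [
--         "id",
--         "student_id",
--         "student_number",
--         "student_name",
--         "school_year",
--         "term",
--         "gpa_type",            # weighted, unweighted, cumulative, etc.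
--         "grade_points",
--         "credits_attempted",
--         "credits_earned",
--         "calculated_gpa",
--         "gpa_scale_id",
--         "gpa_scale_name",
--         "is_cumulative",
--         "is_active",
--         "created_at",
--         "updated_at",
--     ]
--
--     all_keys: List[str] = []
--     for r in rows:
--         for k in r.keys():
--             if k not in all_keys:
--                 all_keys.append(k)
--
--     ordered = [k for k in preferred_order if k in all_keys]
--     ordered.extend(k for k in all_keys if k not in ordered)
--
--     return ordered
-- ===== SOURCE B (Python) =====
-- from typing import Any, Dict, List, Sequence
--
-- def _select_gpa_calculations_fields(
--     rows: Sequence[Dict[str, Any]],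
-- ) -> List[str]:
--     """
--     Choose a stable, user-friendly column ordering.
--     Automatically include any extra keys returned by the API.
--     """
--     preferred_order = [
--         "id",
--         "student_id",
--         "student_number",
--         "student_name",
--         "school_year",
--         "term",
--         "gpa_type",
--         "grade_points",
--         "credits_attempted",
--         "credits_earned",
--         "calculated_gpa",
--         "gpa_scale_id",
--         "gpa_scale_name",
--         "is_cumulative",
--         "is_active",
--         "created_at",
--         "updated_at",
--     ]
--     rank = {k: i for i, k in enumerate(preferred_order)}
--     seen: Dict[str, None] = {}
--     for r in rows:
--         seen.update(dict.fromkeys(r))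
--     # Stable sort: preferred keys by their rank, all extras share the
--     # sentinel rank len(preferred_order), so they keep first-seen order at the end.
--     return sorted(seen, key=lambda k: rank.get(k, len(preferred_order)))
-- ===== Notes on version B (the rewrite author's own statement) =====
-- stated objective: faster
-- what changed: B replaces A's dedup-append list scans and two filtering passes by a rank-dict + stable sort: keys are collected once as dict keys and sorted by rank.get(k, len(preferred_order)), so preferred keys come out in preferred order and extras keep first-seen order via sort stability.
import Mathlib
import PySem

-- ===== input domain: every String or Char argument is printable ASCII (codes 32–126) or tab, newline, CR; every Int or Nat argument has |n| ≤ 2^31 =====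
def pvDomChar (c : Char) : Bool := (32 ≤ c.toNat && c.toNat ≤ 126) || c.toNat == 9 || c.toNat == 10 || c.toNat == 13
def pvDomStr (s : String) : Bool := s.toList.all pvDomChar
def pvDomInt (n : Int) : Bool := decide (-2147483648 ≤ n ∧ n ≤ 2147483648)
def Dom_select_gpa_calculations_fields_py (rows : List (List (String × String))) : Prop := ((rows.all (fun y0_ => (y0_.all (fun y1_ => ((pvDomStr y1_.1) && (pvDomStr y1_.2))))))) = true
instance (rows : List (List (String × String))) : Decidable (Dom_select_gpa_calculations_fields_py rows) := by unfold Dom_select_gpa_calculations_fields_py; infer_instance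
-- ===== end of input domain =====

-- B replaces A's dedup-append scans and two filtering passes by a rank dictionary plus one
-- stable sort of the first-seen keys (extras keep first-seen order via stability): different algorithm.


-- the shared literal `preferred_order`
def pvPreferred : List String :=
  ["id", "student_id", "student_number", "student_name", "school_year", "term",
   "gpa_type", "grade_points", "credits_attempted", "credits_earned",
   "calculated_gpa", "gpa_scale_id", "gpa_scale_name", "is_cumulative",
   "is_active", "created_at", "updated_at"]

-- ===== PORT A =====
-- Literal port of A: guard on empty rows; build all_keys by a dedup-append loop over all rows;
-- ordered = preferred keys present; Python's `ordered.extend(k for k in all_keys if k not in ordered)`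
-- tests membership against the growing list, hence the foldl over the same accumulator.
def select_gpa_calculations_fields_py (rows : List (List (String × String))) : List String :=
  if rows = [] then []
  else
    let allKeys : List String :=
      rows.foldl (fun acc r =>
        r.foldl (fun a kv => if a.contains kv.1 then a else a ++ [kv.1]) acc) []
    let ordered := pvPreferred.filter (fun k => allKeys.contains k)
    allKeys.foldl (fun o k => if o.contains k then o else o ++ [k]) ordered

-- ===== PORT B =====
-- rank = {k: i for i, k in enumerate(preferred_order)}  (a closed dict, hence a top-level helper)
def pvRank : PySem.Dict String Int :=
  (PySem.List.enumerate pvPreferred 0).foldl (fun d p => d.insert p.2 p.1) PySem.Dict.empty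

-- Literal port of Source B: seen = {}; for r in rows: seen.update(dict.fromkeys(r));
-- return sorted(seen, key=lambda k: rank.get(k, len(preferred_order)))
def select_gpa_calculations_fields_py_alt (rows : List (List (String × String))) : List String :=
  let seen : PySem.Dict String (Option Unit) :=
    rows.foldl (fun d r => d.update (r.map (fun kv => (kv.1, (none : Option Unit))))) PySem.Dict.empty
  PySem.List.sorted seen.keys (fun k => pvRank.getD k ((pvPreferred.length : Int)))

-- ===== PRECONDITION & SPEC =====
def Spec_select_gpa_calculations_fields_py (rows : List (List (String × String))) (out : List String) : Prop := out = select_gpa_calculations_fields_py_alt rows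
instance (rows : List (List (String × String))) (out : List String) : Decidable (Spec_select_gpa_calculations_fields_py rows out) := by unfold Spec_select_gpa_calculations_fields_py; infer_instance

-- ===== CLAIM (what is proved, stated in full; the proofs are below) =====
def Claim_equal_select_gpa_calculations_fields_py : Prop := ∀ (rows : List (List (String × String))), Dom_select_gpa_calculations_fields_py rows → Spec_select_gpa_calculations_fields_py rows (select_gpa_calculations_fields_py rows)

-- ===== LEMMAS AND PROOFS =====

-- proof-side abbreviations: the sort key B uses, and the common target shape
def pvKey (k : String) : Int := (List.idxOf k pvPreferred : Int)

def pvT (p : List String) : List String :=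
  pvPreferred.filter (fun k => p.contains k) ++ p.filter (fun k => !pvPreferred.contains k)

-- B's key function equals idxOf into preferred_order (absent keys: idxOf = length = the default)
theorem pv_rank_keys : pvRank.keys = pvPreferred := by decide

theorem pv_key_eq (k : String) : pvRank.getD k ((pvPreferred.length : Int)) = pvKey k := by
  by_cases hk : k ∈ pvPreferred
  · unfold pvPreferred at hk
    fin_cases hk <;> decide
  · have h1 : pvRank.get? k = none :=
      (PySem.Dict.get?_eq_none_iff_not_mem_keys _ _).mpr (by rw [pv_rank_keys]; exact hk)
    rw [PySem.Dict.getD_eq_get?_getD, h1]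
    unfold pvKey
    rw [List.idxOf_eq_length hk]
    rfl

-- idxOf through an append whose left part misses the element
theorem pv_idxOf_append (y : String) (u w : List String) (hy : y ∉ u) :
    List.idxOf y (u ++ w) = u.length + List.idxOf y w := by
  induction u with
  | nil => simp
  | cons a u ih =>
    have hne : a ≠ y := by rintro rfl; exact hy (List.mem_cons_self ..)
    have hy' : y ∉ u := fun h => hy (List.mem_cons_of_mem _ h)
    have hbeq : (a == y) = false := by simp [hne]
    rw [List.cons_append, List.idxOf_cons, hbeq]
    simp only [cond_false, List.length_cons, ih hy']
    omega

-- stable insertion lands exactly between the not-before prefix and the before suffix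
theorem pv_insertBy_split (b : String → String → Bool) (x : String) (u v : List String)
    (hu : ∀ y ∈ u, b x y = false) (hv : ∀ z ∈ v.head?, b x z = true) :
    PySem.List.insertBy b x (u ++ v) = u ++ x :: v := by
  induction u with
  | nil =>
    cases v with
    | nil => simp [PySem.List.insertBy]
    | cons h t =>
      have hh : b x h = true := hv h (by simp)
      simp [PySem.List.insertBy, hh]
  | cons a u ih =>
    have ha : b x a = false := hu a (by simp)
    rw [List.cons_append]
    simp only [PySem.List.insertBy, ha]
    rw [ih (fun y hy => hu y (by simp [hy]))]
    simp

-- one stable insertion step preserves the target shape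
theorem pv_step (p : List String) (x : String) (hx : x ∉ p) :
    PySem.List.insertBy (fun a b => decide (pvKey a < pvKey b)) x (pvT p) = pvT (p ++ [x]) := by
  have hcpx : p.contains x = false := by simpa [List.contains_eq_mem] using hx
  by_cases hxp : x ∈ pvPreferred
  · -- preferred key: it lands between the ranked-before and ranked-after preferred keys
    have hnd : pvPreferred.Nodup := by decide
    have hilt : List.idxOf x pvPreferred < pvPreferred.length := List.idxOf_lt_length_iff.mpr hxp
    set i := List.idxOf x pvPreferred with hi
    have hq : pvPreferred = pvPreferred.take i ++ x :: pvPreferred.drop (i + 1) := by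
      conv_lhs => rw [← List.take_append_drop i pvPreferred, List.drop_eq_getElem_cons hilt]
      rw [List.getElem_idxOf hilt]
    have hnd2 : (pvPreferred.take i ++ x :: pvPreferred.drop (i + 1)).Nodup := hq ▸ hnd
    rcases List.nodup_append.mp hnd2 with ⟨hndt, hndxd, hdisj⟩
    have hxdrop : x ∉ pvPreferred.drop (i + 1) := (List.nodup_cons.mp hndxd).1
    have hxtake : x ∉ pvPreferred.take i := fun h => hdisj x h x (List.mem_cons_self ..) rfl
    have htklen : (pvPreferred.take i).length = i := by
      rw [List.length_take]; omega
    -- keys of the three zones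
    have hkx : pvKey x = (i : Int) := by unfold pvKey; rw [← hi]
    have hktake : ∀ y ∈ pvPreferred.take i, pvKey y < (i : Int) := by
      intro y hy
      have h1 : List.idxOf y pvPreferred = List.idxOf y (pvPreferred.take i) := by
        conv_lhs => rw [hq]
        exact List.idxOf_append_of_mem hy
      have h2 : List.idxOf y (pvPreferred.take i) < (pvPreferred.take i).length :=
        List.idxOf_lt_length_iff.mpr hy
      rw [htklen] at h2
      unfold pvKey; rw [h1]; exact_mod_cast h2
    have hkdrop : ∀ y ∈ pvPreferred.drop (i + 1), (i : Int) < pvKey y := by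
      intro y hy
      have hyt : y ∉ pvPreferred.take i := fun h => hdisj y h y (List.mem_cons_of_mem _ hy) rfl
      have hyx : y ≠ x := fun he => hxdrop (he ▸ hy)
      have h1 : List.idxOf y pvPreferred
          = (pvPreferred.take i).length + List.idxOf y (x :: pvPreferred.drop (i + 1)) := by
        conv_lhs => rw [hq]
        exact pv_idxOf_append y _ _ hyt
      have h2 : List.idxOf y (x :: pvPreferred.drop (i + 1))
          = (1 : Nat) + List.idxOf y (pvPreferred.drop (i + 1)) := by
        have := pv_idxOf_append y [x] (pvPreferred.drop (i + 1)) (by simp [hyx])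
        simpa using this
      unfold pvKey
      rw [h1, h2, htklen]
      push_cast
      omega
    have hkextra : ∀ y ∈ p.filter (fun k => !pvPreferred.contains k), (i : Int) < pvKey y := by
      intro y hy
      have : y ∉ pvPreferred := by
        have := List.of_mem_filter hy
        simpa [List.contains_eq_mem] using this
      unfold pvKey
      rw [List.idxOf_eq_length this]
      exact_mod_cast hilt
    -- split the preferred filter around x
    have hsplit : ∀ (c : String → Bool),
        pvPreferred.filter c
          = (pvPreferred.take i).filter c
            ++ (x :: pvPreferred.drop (i + 1)).filter c := by
      intro c; conv_lhs => rw [hq]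
      rw [List.filter_append]
    have hLHS : pvT p
        = (pvPreferred.take i).filter (fun k => p.contains k)
          ++ ((pvPreferred.drop (i + 1)).filter (fun k => p.contains k)
              ++ p.filter (fun k => !pvPreferred.contains k)) := by
      unfold pvT
      rw [hsplit (fun k => p.contains k), List.filter_cons, hcpx]
      simp [List.append_assoc]
    have hRHS : pvT (p ++ [x])
        = (pvPreferred.take i).filter (fun k => p.contains k)
          ++ x :: ((pvPreferred.drop (i + 1)).filter (fun k => p.contains k)
              ++ p.filter (fun k => !pvPreferred.contains k)) := by
      unfold pvT
      have hcong : ∀ (l : List String), x ∉ l →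
          l.filter (fun k => (p ++ [x]).contains k) = l.filter (fun k => p.contains k) := by
        intro l hxl
        apply List.filter_congr
        intro k hk
        have : k ≠ x := fun he => hxl (he ▸ hk)
        simp [List.contains_eq_mem, List.mem_append, this]
      have hcx : (p ++ [x]).contains x = true := by simp [List.contains_eq_mem]
      rw [hsplit (fun k => (p ++ [x]).contains k), List.filter_cons, hcx,
          hcong _ hxtake, hcong _ hxdrop, List.filter_append]
      have : [x].filter (fun k => !pvPreferred.contains k) = [] := by
        simp [List.contains_eq_mem, hxp]
      rw [this]
      simp [List.append_assoc]
    rw [hLHS, hRHS]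
    apply pv_insertBy_split
    · intro y hy
      have := hktake y (List.mem_of_mem_filter hy)
      simp only [decide_eq_false_iff_not, not_lt, hkx]
      omega
    · intro z hz
      have hzmem : z ∈ (pvPreferred.drop (i + 1)).filter (fun k => p.contains k)
          ++ p.filter (fun k => !pvPreferred.contains k) := List.mem_of_mem_head? hz
      have : (i : Int) < pvKey z := by
        rcases List.mem_append.mp hzmem with h | h
        · exact hkdrop z (List.mem_of_mem_filter h)
        · exact hkextra z h
      simp only [decide_eq_true_eq, hkx]
      omega
  · -- extra key: every current key sorts no later, so it is appended at the end
    have hkx : pvKey x = (pvPreferred.length : Int) := by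
      unfold pvKey; rw [List.idxOf_eq_length hxp]
    rw [PySem.List.insertBy_of_forall_not_before]
    · unfold pvT
      have h1 : pvPreferred.filter (fun k => (p ++ [x]).contains k)
          = pvPreferred.filter (fun k => p.contains k) := by
        apply List.filter_congr
        intro k hk
        have : k ≠ x := fun he => hxp (he ▸ hk)
        simp [List.contains_eq_mem, List.mem_append, this]
      have h2 : (p ++ [x]).filter (fun k => !pvPreferred.contains k)
          = p.filter (fun k => !pvPreferred.contains k) ++ [x] := by
        rw [List.filter_append]
        simp [List.contains_eq_mem, hxp]
      rw [h1, h2, ← List.append_assoc]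
    · intro y hy
      simp only [decide_eq_false_iff_not, not_lt, hkx]
      unfold pvT at hy
      rcases List.mem_append.mp hy with h | h
      · have hmem : y ∈ pvPreferred := List.mem_of_mem_filter h
        have : List.idxOf y pvPreferred < pvPreferred.length := List.idxOf_lt_length_iff.mpr hmem
        unfold pvKey
        exact_mod_cast Nat.le_of_lt this
      · have : y ∉ pvPreferred := by
          have := List.of_mem_filter h
          simpa [List.contains_eq_mem] using this
        unfold pvKey
        rw [List.idxOf_eq_length this]

-- the whole stable insertion sort produces the target shape
theorem pv_foldl_sort (l : List String) (p : List String) (hnd : (p ++ l).Nodup) :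
    l.foldl (fun acc x => PySem.List.insertBy (fun a b => decide (pvKey a < pvKey b)) x acc) (pvT p)
      = pvT (p ++ l) := by
  induction l generalizing p with
  | nil => simp
  | cons x l ih =>
    have hx : x ∉ p := by
      rcases List.nodup_append.mp hnd with ⟨_, _, hdisj⟩
      intro h
      exact hdisj x h x (List.mem_cons_self ..) rfl
    have hassoc : (p ++ [x]) ++ l = p ++ x :: l := by simp
    rw [List.foldl_cons, pv_step p x hx, ih (p ++ [x]) (by rw [hassoc]; exact hnd), hassoc]

theorem pv_sorted_T (l : List String) (h : l.Nodup) :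
    PySem.List.sorted l pvKey = pvT l := by
  rw [PySem.List.sorted_eq_foldl_insertBy]
  have h0 : pvT [] = [] := by simp [pvT]
  have := pv_foldl_sort l [] (by simpa using h)
  rw [h0] at this
  simpa using this

-- A's dedup loops keep the key list duplicate-free
theorem pv_nodup_keyfold (r : List (String × String)) (a : List String) (ha : a.Nodup) :
    (r.foldl (fun a kv => if a.contains kv.1 then a else a ++ [kv.1]) a).Nodup := by
  induction r generalizing a with
  | nil => exact ha
  | cons kv rest ih =>
    simp only [List.foldl_cons]
    by_cases h : a.contains kv.1 = true
    · rw [if_pos h]; exact ih a ha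
    · rw [if_neg h]
      have hmem : kv.1 ∉ a := by simpa [List.contains_eq_mem] using h
      refine ih _ ?_
      simp [List.nodup_append, ha]
      intro x hx he
      exact hmem (he ▸ hx)

theorem pv_nodup_allKeys (rows : List (List (String × String))) (a : List String) (ha : a.Nodup) :
    (rows.foldl (fun acc r =>
      r.foldl (fun a kv => if a.contains kv.1 then a else a ++ [kv.1]) acc) a).Nodup := by
  induction rows generalizing a with
  | nil => exact ha
  | cons r rest ih => exact ih _ (pv_nodup_keyfold r a ha)

-- A's extend-loop appends exactly the keys not already in `ordered`
theorem pv_extend_eq (l ord : List String) (hl : l.Nodup) :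
    l.foldl (fun o k => if o.contains k then o else o ++ [k]) ord
      = ord ++ l.filter (fun k => !ord.contains k) := by
  induction l generalizing ord with
  | nil => simp
  | cons k rest ih =>
    rcases List.nodup_cons.mp hl with ⟨hk, hrest⟩
    simp only [List.foldl_cons, List.filter_cons]
    by_cases h : ord.contains k = true
    · rw [if_pos h, ih ord hrest, h]
      simp
    · have hb : ord.contains k = false := by simpa using h
      rw [if_neg h, ih _ hrest, hb]
      have hcong : rest.filter (fun k' => !(ord ++ [k]).contains k')
          = rest.filter (fun k' => !ord.contains k') := by
        apply List.filter_congr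
        intro k' hk'
        have hne : k' ≠ k := fun he => hk (he ▸ hk')
        simp [List.contains_eq_mem, hne]
      rw [hcong]
      simp

-- B's seen-dict keys are exactly A's first-seen dedup list
theorem pv_keys_seen (rows : List (List (String × String)))
    (d : PySem.Dict String (Option Unit)) (a : List String) (h : d.keys = a) :
    (rows.foldl (fun d r => d.update (r.map (fun kv => (kv.1, (none : Option Unit))))) d).keys
      = rows.foldl (fun acc r =>
          r.foldl (fun a kv => if a.contains kv.1 then a else a ++ [kv.1]) acc) a := by
  induction rows generalizing d a with
  | nil => exact h
  | cons r rest ih =>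
    simp only [List.foldl_cons]
    apply ih
    have h1 : (d.update (r.map (fun kv => (kv.1, (none : Option Unit))))).keys
        = PySem.Set.update d.keys
            ((r.map (fun kv => (kv.1, (none : Option Unit)))).map (fun p => p.1)) := by
      have h0 := PySem.Dict.keys_foldl_insert_key (κ := String) (ν := Option Unit)
        (r.map (fun kv : String × String => (kv.1, (none : Option Unit))))
        (fun p : String × Option Unit => p.1) (fun _ p => p.2) d
      exact h0
    rw [h1, List.map_map, h]
    have h2 : ((fun p : String × Option Unit => p.1)
        ∘ (fun kv : String × String => (kv.1, (none : Option Unit)))) = fun kv => kv.1 := rfl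
    rw [h2, PySem.Set.update_map_eq_foldl_add]
    rfl

-- ===== VERDICT (by name: the statement is the Claim_ definition above) =====
theorem select_gpa_calculations_fields_py_spec : Claim_equal_select_gpa_calculations_fields_py := by
  intro rows _
  unfold Spec_select_gpa_calculations_fields_py
  unfold select_gpa_calculations_fields_py select_gpa_calculations_fields_py_alt
  by_cases hempty : rows = []
  · subst hempty; decide
  · rw [if_neg hempty]
    have hkeys := pv_keys_seen rows PySem.Dict.empty [] PySem.Dict.keys_empty
    have hkf : (fun k => pvRank.getD k ((pvPreferred.length : Int))) = pvKey := funext pv_key_eq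
    show (List.foldl (fun o k => if o.contains k = true then o else o ++ [k])
        (List.filter (fun k => (List.foldl (fun acc r => List.foldl (fun a kv => if a.contains kv.1 = true then a else a ++ [kv.1]) acc r) [] rows).contains k) pvPreferred)
        (List.foldl (fun acc r => List.foldl (fun a kv => if a.contains kv.1 = true then a else a ++ [kv.1]) acc r) [] rows))
      = PySem.List.sorted (List.foldl (fun d r => d.update (List.map (fun kv => (kv.1, (none : Option Unit))) r)) PySem.Dict.empty rows).keys
          (fun k => pvRank.getD k ((pvPreferred.length : Int)))
    rw [hkeys, hkf]
    set allKeys := rows.foldl (fun acc r =>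
      r.foldl (fun a kv => if a.contains kv.1 then a else a ++ [kv.1]) acc) [] with hak
    have hnd : allKeys.Nodup := pv_nodup_allKeys rows [] List.nodup_nil
    rw [pv_sorted_T allKeys hnd, pv_extend_eq allKeys _ hnd]
    have hextra : allKeys.filter (fun k =>
          !(pvPreferred.filter (fun k => allKeys.contains k)).contains k)
        = allKeys.filter (fun k => !pvPreferred.contains k) := by
      apply List.filter_congr
      intro k hk
      simp [List.contains_eq_mem, List.mem_filter, hk]
    rw [hextra]
    rfl
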